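-- pv_equiv track=rewrite | github.com/AdrianSuliga/ADS | BIT/Dynamiki_Ćwiczenia/zad3k.py | ksuma
-- ===== SOURCE A (Python) =====
-- from math import inf
--
-- def ksuma(T, k):
--     n = len(T)
--     F = [T[i] for i in range(n)]
--
--     for i in range(k, n):
--         res = inf
--         for j in range(i - k, i):
--             res = min(res, F[j])
--         F[i] += res
--
--     return min(F[n - k : n])
-- ===== SOURCE B (Python) =====
-- def ksuma(T, k):
--     n = len(T)
--     F = list(T)
--     dq = []    # indices into F; F-values nondecreasing along dq[head:]
--     head = 0   # front pointer (lazy pops)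
--     for i in range(n):
--         if i >= k:
--             # drop indices that left the window [i-k, i-1]
--             while head < len(dq) and dq[head] < i - k:
--                 head += 1
--             F[i] += F[dq[head]]
--         # maintain monotonicity, then push i
--         while len(dq) > head and F[dq[-1]] >= F[i]:
--             dq.pop()
--         dq.append(i)
--     return min(F[n - k:])
-- ===== Notes on version B (the rewrite author's own statement) =====
-- stated objective: faster
-- what changed: The inner O(k) rescan of the previous k DP values is replaced by a monotonic deque (list with a lazy front pointer) that yields each sliding-window minimum in amortized O(1).
import Mathlib
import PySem

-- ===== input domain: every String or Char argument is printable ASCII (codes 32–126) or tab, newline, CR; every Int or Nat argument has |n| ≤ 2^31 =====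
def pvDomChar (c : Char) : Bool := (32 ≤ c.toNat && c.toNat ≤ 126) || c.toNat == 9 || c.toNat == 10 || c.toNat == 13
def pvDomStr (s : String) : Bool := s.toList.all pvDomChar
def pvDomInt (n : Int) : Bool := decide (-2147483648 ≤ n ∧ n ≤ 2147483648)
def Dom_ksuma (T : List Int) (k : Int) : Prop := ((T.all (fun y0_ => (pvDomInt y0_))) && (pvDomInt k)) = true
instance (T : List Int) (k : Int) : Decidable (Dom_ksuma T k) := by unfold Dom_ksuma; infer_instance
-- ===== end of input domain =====

-- B replaces A's inner O(k) rescan of the previous k DP values by a monotonic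
-- deque giving each sliding-window minimum in amortized O(1) (measured faster, asymptotic).


-- ===== PORT A =====
-- 'res = min(res, F[j])' with res starting at math.inf: none plays inf, exact
-- because under Pre_ every j hit is in range (pyGetD's default is never read).
def pvMinInf (r : Option Int) (v : Int) : Option Int :=
  match r with
  | none => some v
  | some r => some (min r v)

-- one iteration of A's outer loop; '.getD 0' is unreachable under Pre_ (the inner
-- range is nonempty since k ≥ 1), pySetD/pyGetD are exact there (0 ≤ i < len F).
def ksumaStep (k : Int) (F : List Int) (i : Int) : List Int :=
  let res := (PySem.List.pyRange (i - k) i 1).foldl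
      (fun r j => pvMinInf r (PySem.List.pyGetD F j 0)) none
  PySem.List.pySetD F i (PySem.List.pyGetD F i 0 + res.getD 0)

def ksuma (T : List Int) (k : Int) : Int :=
  let n : Int := T.length
  let F := (PySem.List.pyRange 0 n 1).map (fun i => PySem.List.pyGetD T i 0)
  let F := (PySem.List.pyRange k n 1).foldl (ksumaStep k) F
  -- 'min(F[n-k:n])'; min() of [] raises ValueError, excluded by Pre_ (the 0 branch)
  match PySem.List.min? (PySem.List.slice F (some (n - k)) (some n)) (fun y => y) with
  | some m => m
  | none => 0

-- ===== PORT B =====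
-- 'while head < len(dq) and dq[head] < bound: head += 1'
def pvAdvance (dq : List Int) (head : Int) (bound : Int) : Int :=
  if h : head < dq.length ∧ PySem.List.pyGetD dq head 0 < bound then
    pvAdvance dq (head + 1) bound
  else head
termination_by ((dq.length : Int) - head).toNat
decreasing_by omega

-- 'while len(dq) > head and F[dq[-1]] >= F[i]: dq.pop()'; the '0 ≤ head' conjunct
-- only makes the recursion total (head is a Python index, always ≥ 0).
def pvPopBack (fi : Int) (F : List Int) (dq : List Int) (head : Int) : List Int :=
  if h : 0 ≤ head ∧ head < dq.length ∧ PySem.List.pyGetD F (PySem.List.pyGetD dq (-1) 0) 0 ≥ fi then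
    pvPopBack fi F dq.dropLast head
  else dq
termination_by dq.length
decreasing_by simp [List.length_dropLast]; omega

-- one iteration of B's loop over i; state (F, dq, head)
def pvBStep (k : Int) (s : List Int × List Int × Int) (i : Int) : List Int × List Int × Int :=
  let F := s.1
  let dq := s.2.1
  let head := s.2.2
  let p : List Int × Int :=
    if k ≤ i then
      let head := pvAdvance dq head (i - k)
      (PySem.List.pySetD F i
        (PySem.List.pyGetD F i 0 +
          PySem.List.pyGetD F (PySem.List.pyGetD dq head 0) 0), head)
    else (F, head)
  let dq := pvPopBack (PySem.List.pyGetD p.1 i 0) p.1 dq p.2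
  (p.1, dq ++ [i], p.2)

def ksuma_alt (T : List Int) (k : Int) : Int :=
  let n : Int := T.length
  let s := (PySem.List.pyRange 0 n 1).foldl (pvBStep k) (T, ([], 0))
  -- 'min(F[n-k:])'
  match PySem.List.min? (PySem.List.slice s.1 (some (n - k)) none) (fun y => y) with
  | some m => m
  | none => 0

-- ===== PRECONDITION & SPEC =====
-- Pre_ excludes exactly the inputs on which A raises ValueError (min() of an
-- empty sequence): k ≤ 0, or T empty.
def Pre_ksuma (T : List Int) (k : Int) : Prop := 1 ≤ k ∧ T ≠ []
instance (T : List Int) (k : Int) : Decidable (Pre_ksuma T k) := by unfold Pre_ksuma; infer_instance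
def pvWitness_ksuma : List Int × Int := ([3, 1, 4, 1, 5], 2)
def Spec_ksuma (T : List Int) (k : Int) (out : Int) : Prop := out = ksuma_alt T k
instance (T : List Int) (k : Int) (out : Int) : Decidable (Spec_ksuma T k out) := by unfold Spec_ksuma; infer_instance

-- ===== CLAIM (what is proved, stated in full; the proofs are below) =====
def Claim_equal_ksuma : Prop := ∀ (T : List Int) (k : Int), Dom_ksuma T k → Pre_ksuma T k → Spec_ksuma T k (ksuma T k)

-- ===== LEMMAS AND PROOFS =====

-- A's DP array after the outer loop has run for indices k..i-1
def pvFA (T : List Int) (k i : Int) : List Int :=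
  (PySem.List.pyRange k i 1).foldl (ksumaStep k) T

-- B's state after the loop has run for indices 0..i-1
def pvBS (T : List Int) (k i : Int) : List Int × List Int × Int :=
  (PySem.List.pyRange 0 i 1).foldl (pvBStep k) (T, ([], 0))

def pvVal (F : List Int) (e : Int) : Int := PySem.List.pyGetD F e 0

-- the loop invariant: B's F equals A's F, and dq[head:] is the monotonic deque
def pvInv (T : List Int) (k i : Int) : Prop :=
  ∃ dq head,
    pvBS T k i = (pvFA T k i, dq, head) ∧ 0 ≤ head ∧ head.toNat ≤ dq.length ∧
    (dq.drop head.toNat).Pairwise (· < ·) ∧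
    (∀ e ∈ dq.drop head.toNat, 0 ≤ e ∧ e < i) ∧
    ((dq.drop head.toNat).map (pvVal (pvFA T k i))).Pairwise (· ≤ ·) ∧
    (∀ m : Int, 0 ≤ m → i - k ≤ m → m < i →
      ∃ e ∈ dq.drop head.toNat, m ≤ e ∧ pvVal (pvFA T k i) e ≤ pvVal (pvFA T k i) m)

lemma pvFA_succ (T : List Int) (k i : Int) (h : k ≤ i) :
    pvFA T k (i + 1) = ksumaStep k (pvFA T k i) i := by
  unfold pvFA
  rw [PySem.List.pyRange_one_succ_right h, List.foldl_append]
  rfl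

lemma pvFA_succ_lt (T : List Int) (k i : Int) (h : i < k) :
    pvFA T k (i + 1) = pvFA T k i := by
  unfold pvFA
  rw [PySem.List.pyRange_one_eq_nil (by omega), PySem.List.pyRange_one_eq_nil (by omega)]

lemma pvBS_succ (T : List Int) (k i : Int) (h : 0 ≤ i) :
    pvBS T k (i + 1) = pvBStep k (pvBS T k i) i := by
  unfold pvBS
  rw [PySem.List.pyRange_one_succ_right h, List.foldl_append]
  rfl

-- writing F[i] does not change entries e ≠ i
lemma pvVal_set (F : List Int) (i v e : Int) (hi : 0 ≤ i) (he : 0 ≤ e) (hne : e ≠ i) :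
    pvVal (PySem.List.pySetD F i v) e = pvVal F e := by
  unfold pvVal
  rw [PySem.List.pySetD_of_nonneg F v hi, PySem.List.pyGetD_of_nonneg _ _ he,
    PySem.List.pyGetD_of_nonneg _ _ he]
  simp only [List.getD_eq_getElem?_getD]
  rw [List.getElem?_set_ne (by omega)]

-- folding Python's min from math.inf computes the running min
lemma pvMinInf_foldl (t : List Int) (a : Int) :
    t.foldl (fun r v => pvMinInf r v) (some a) = some (t.foldl min a) := by
  induction t generalizing a with
  | nil => rfl
  | cons x xs ih => simpa [pvMinInf] using ih (min a x)

lemma pvAdvance_spec (dq : List Int) (bound : Int) (head : Int) (h0 : 0 ≤ head)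
    (hle : head.toNat ≤ dq.length) :
    0 ≤ pvAdvance dq head bound ∧ (pvAdvance dq head bound).toNat ≤ dq.length ∧
      dq.drop (pvAdvance dq head bound).toNat =
        (dq.drop head.toNat).dropWhile (fun e => decide (e < bound)) := by
  fun_induction pvAdvance dq head bound with
  | case1 head h ih =>
    have hlt : head.toNat < dq.length := by omega
    have hget : PySem.List.pyGetD dq head 0 = dq[head.toNat] :=
      PySem.List.pyGetD_eq_getElem dq 0 h0 (by omega)
    obtain ⟨ih1, ih2, ih3⟩ := ih (by omega) (by omega)
    refine ⟨ih1, ih2, ?_⟩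
    rw [ih3, List.drop_eq_getElem_cons hlt, List.dropWhile_cons]
    have : ((head + 1).toNat : ℕ) = head.toNat + 1 := by omega
    simp [hget ▸ h.2, this]
  | case2 head h =>
    refine ⟨h0, hle, ?_⟩
    rcases Nat.lt_or_ge head.toNat dq.length with hlt | hge
    · have hget : PySem.List.pyGetD dq head 0 = dq[head.toNat] :=
        PySem.List.pyGetD_eq_getElem dq 0 h0 (by omega)
      have hnb : ¬ (dq[head.toNat] < bound) := by
        intro hc; exact h ⟨by omega, hget ▸ hc⟩
      rw [List.drop_eq_getElem_cons hlt, List.dropWhile_cons]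
      simp [hnb]
    · rw [List.drop_eq_nil_of_le hge]
      simp

lemma pvPopBack_spec (fi : Int) (F : List Int) (dq : List Int) (head : Int) (h0 : 0 ≤ head)
    (hle : head.toNat ≤ dq.length) :
    pvPopBack fi F dq head = dq.take head.toNat ++
      ((dq.drop head.toNat).reverse.dropWhile
        (fun e => decide (PySem.List.pyGetD F e 0 ≥ fi))).reverse := by
  fun_induction pvPopBack fi F dq head with
  | case1 dq h ih =>
    have hdq : dq ≠ [] := by rintro rfl; simp at h; omega
    have hlt : head.toNat < dq.length := by omega
    have hd : dq.drop head.toNat ≠ [] := by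
      rw [ne_eq, List.drop_eq_nil_iff]; omega
    have hlast : PySem.List.pyGetD dq (-1) 0 = (dq.drop head.toNat).getLast hd := by
      rw [PySem.List.pyGetD_neg_one dq 0 hdq, List.getLast_drop]
    have hrev : (dq.drop head.toNat).reverse =
        (dq.drop head.toNat).getLast hd :: (dq.drop head.toNat).dropLast.reverse := by
      conv_lhs => rw [← List.dropLast_append_getLast hd]
      simp
    have htake : dq.dropLast.take head.toNat = dq.take head.toNat := by
      rw [List.dropLast_eq_take, List.take_take]
      congr 1; omega
    have hdrop : dq.dropLast.drop head.toNat = (dq.drop head.toNat).dropLast := by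
      rw [List.dropLast_eq_take, List.drop_take, List.dropLast_eq_take, List.length_drop]
      congr 1; omega
    rw [ih (by simp [List.length_dropLast]; omega), htake, hdrop, hrev,
      List.dropWhile_cons]
    have hge2 : PySem.List.pyGetD F ((dq.drop head.toNat).getLast hd) 0 ≥ fi := hlast ▸ h.2.2
    simp only [ge_iff_le] at hge2
    simp only [hge2, decide_true, if_true]
  | case2 dq h =>
    rcases Nat.lt_or_ge head.toNat dq.length with hlt | hge
    · have hdq : dq ≠ [] := by rintro rfl; simp at hlt
      have hd : dq.drop head.toNat ≠ [] := by
        rw [ne_eq, List.drop_eq_nil_iff]; omega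
      have hlast : PySem.List.pyGetD dq (-1) 0 = (dq.drop head.toNat).getLast hd := by
        rw [PySem.List.pyGetD_neg_one dq 0 hdq, List.getLast_drop]
      have hnb : ¬ (PySem.List.pyGetD F ((dq.drop head.toNat).getLast hd) 0 ≥ fi) := by
        intro hc; exact h ⟨h0, by omega, hlast ▸ hc⟩
      have hrev : (dq.drop head.toNat).reverse =
          (dq.drop head.toNat).getLast hd :: (dq.drop head.toNat).dropLast.reverse := by
        conv_lhs => rw [← List.dropLast_append_getLast hd]
        simp
      rw [hrev, List.dropWhile_cons]
      simp only [hnb, decide_false, if_false, Bool.false_eq_true]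
      rw [← hrev, List.reverse_reverse, List.take_append_drop]
    · rw [List.drop_eq_nil_of_le hge]
      simp [List.take_of_length_le hge]

-- in a strictly increasing list, elements ≥ bound survive dropWhile (· < bound)
lemma pv_mem_dropWhile_of_sorted (d : List Int) (bound e : Int) (hp : d.Pairwise (· < ·))
    (he : e ∈ d) (hb : bound ≤ e) : e ∈ d.dropWhile (fun x => decide (x < bound)) := by
  induction d with
  | nil => simp at he
  | cons x xs ih =>
    rw [List.dropWhile_cons]
    by_cases hx : x < bound
    · simp only [hx, decide_true, if_true]
      rcases List.mem_cons.mp he with rfl | hmem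
      · omega
      · exact ih hp.of_cons hmem
    · simpa [hx] using he

-- the head of a dropWhile result falsifies the predicate
lemma pv_head_dropWhile {α : Type} (p : α → Bool) (l : List α) (x : α) (r : List α)
    (h : l.dropWhile p = x :: r) : p x = false := by
  induction l with
  | nil => simp at h
  | cons y ys ih =>
    rw [List.dropWhile_cons] at h
    by_cases hy : p y
    · simp [hy] at h; exact ih h
    · simp [hy] at h
      obtain ⟨rfl, rfl⟩ := h
      simpa using hy

-- popping values ≥ F[i] from the back and appending i preserves the deque shape
lemma pvPop_push (G : List Int) (d : List Int) (i : Int)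
    (hsort : d.Pairwise (· < ·))
    (hbnd : ∀ e ∈ d, 0 ≤ e ∧ e < i)
    (hvals : (d.map (pvVal G)).Pairwise (· ≤ ·))
    (hi : 0 ≤ i) :
    ((((d.reverse.dropWhile
        (fun e => decide (PySem.List.pyGetD G e 0 ≥ PySem.List.pyGetD G i 0))).reverse)
        ++ [i]).Pairwise (· < ·)) ∧
    (∀ e ∈ ((d.reverse.dropWhile
        (fun e => decide (PySem.List.pyGetD G e 0 ≥ PySem.List.pyGetD G i 0))).reverse)
        ++ [i], 0 ≤ e ∧ e < i + 1) ∧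
    ((((d.reverse.dropWhile
        (fun e => decide (PySem.List.pyGetD G e 0 ≥ PySem.List.pyGetD G i 0))).reverse)
        ++ [i]).map (pvVal G)).Pairwise (· ≤ ·) ∧
    (∀ e ∈ d, e ∈ ((d.reverse.dropWhile
        (fun e => decide (PySem.List.pyGetD G e 0 ≥ PySem.List.pyGetD G i 0))).reverse)
        ∨ pvVal G i ≤ pvVal G e) := by
  set p : Int → Bool :=
    fun e => decide (PySem.List.pyGetD G e 0 ≥ PySem.List.pyGetD G i 0) with hp
  set X : List Int := (d.reverse.dropWhile p).reverse with hX
  have hdXY : d = X ++ (d.reverse.takeWhile p).reverse := by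
    conv_lhs => rw [← List.reverse_reverse d,
      ← List.takeWhile_append_dropWhile (p := p) (l := d.reverse)]
    rw [List.reverse_append]
  have hXsub : X.Sublist d := by
    rw [hdXY]; exact List.sublist_append_left X _
  have hmemX : ∀ e ∈ X, e ∈ d := fun e he => hXsub.mem he
  have hY : ∀ e ∈ d, e ∈ X ∨ pvVal G i ≤ pvVal G e := by
    intro e he
    rw [hdXY] at he
    rcases List.mem_append.mp he with h1 | h1
    · exact Or.inl h1
    · right
      have := List.mem_takeWhile_imp (List.mem_reverse.mp h1)
      simpa [hp, pvVal, ge_iff_le] using this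
  have hXle : ∀ e ∈ X, pvVal G e ≤ pvVal G i := by
    intro e he
    rcases hXnil : d.reverse.dropWhile p with _ | ⟨y, r⟩
    · rw [hX, hXnil] at he; simp at he
    · have hpy : p y = false := pv_head_dropWhile p d.reverse y r hXnil
      have hylt : pvVal G y < pvVal G i := by
        simpa [hp, pvVal, ge_iff_le, not_le] using hpy
      -- values are nonincreasing along d.reverse, hence along its dropWhile
      have hrev : (d.reverse.map (pvVal G)).Pairwise (· ≥ ·) := by
        rw [List.map_reverse]
        exact List.pairwise_reverse.mpr hvals
      have hsubrev : (d.reverse.dropWhile p).Sublist d.reverse :=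
        List.dropWhile_sublist p
      have hvrev : ((y :: r).map (pvVal G)).Pairwise (· ≥ ·) := by
        rw [← hXnil]
        exact hrev.sublist (hsubrev.map _)
      have hyr : ∀ z ∈ r, pvVal G z ≤ pvVal G y := by
        intro z hz
        have := (List.pairwise_cons.mp hvrev).1 (pvVal G z) (List.mem_map_of_mem hz)
        exact this
      have heX : e ∈ y :: r := by
        rw [← hXnil, ← List.mem_reverse, ← hX]; exact he
      rcases List.mem_cons.mp heX with rfl | hz
      · exact le_of_lt hylt
      · exact le_of_lt (lt_of_le_of_lt (hyr e hz) hylt)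
  refine ⟨?_, ?_, ?_, hY⟩
  · rw [List.pairwise_append]
    exact ⟨hsort.sublist hXsub, List.pairwise_singleton _ _,
      fun a ha b hb => by
        rcases List.mem_singleton.mp hb with rfl
        exact (hbnd a (hmemX a ha)).2⟩
  · intro e he
    rcases List.mem_append.mp he with h1 | h1
    · have := hbnd e (hmemX e h1); omega
    · rcases List.mem_singleton.mp h1 with rfl; omega
  · rw [List.map_append, List.pairwise_append]
    refine ⟨(hvals.sublist (hXsub.map _)), by simp, ?_⟩
    intro a ha b hb
    simp only [List.map_cons, List.map_nil, List.mem_singleton] at hb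
    subst hb
    rcases List.mem_map.mp ha with ⟨e, heX, rfl⟩
    exact hXle e heX

-- gluing the pieces back into the invariant after one iteration
lemma pvInv_assemble (T : List Int) (k i : Int) (hk : 1 ≤ k) (hi : 0 ≤ i)
    (pre d' : List Int) (head' : Int)
    (h0' : 0 ≤ head') (hpre : pre.length = head'.toNat)
    (hBS1 : pvBS T k (i + 1) = (pvFA T k (i + 1),
      pre ++ (((d'.reverse.dropWhile (fun e => decide (PySem.List.pyGetD (pvFA T k (i + 1)) e 0 ≥
        PySem.List.pyGetD (pvFA T k (i + 1)) i 0))).reverse) ++ [i]), head'))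
    (hsort' : d'.Pairwise (· < ·))
    (hbnd' : ∀ e ∈ d', 0 ≤ e ∧ e < i)
    (hvalsG : (d'.map (pvVal (pvFA T k (i + 1)))).Pairwise (· ≤ ·))
    (hstab : ∀ e, 0 ≤ e → e < i → pvVal (pvFA T k (i + 1)) e = pvVal (pvFA T k i) e)
    (hcomp' : ∀ m : Int, 0 ≤ m → i + 1 - k ≤ m → m < i →
      ∃ e ∈ d', m ≤ e ∧ pvVal (pvFA T k i) e ≤ pvVal (pvFA T k i) m) :
    pvInv T k (i + 1) := by
  set G := pvFA T k (i + 1) with hGdef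
  set X : List Int := (d'.reverse.dropWhile (fun e => decide (PySem.List.pyGetD G e 0 ≥
    PySem.List.pyGetD G i 0))).reverse with hXdef
  obtain ⟨hp1, hp2, hp3, hp4⟩ := pvPop_push G d' i hsort' hbnd' hvalsG hi
  have hdrop2 : (pre ++ (X ++ [i])).drop head'.toNat = X ++ [i] := by
    rw [List.drop_append_of_le_length (by omega), List.drop_eq_nil_of_le (by omega),
      List.nil_append]
  refine ⟨pre ++ (X ++ [i]), head', hBS1, h0', ?_, ?_, ?_, ?_, ?_⟩
  · simp [hpre]
  · rw [hdrop2]; exact hp1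
  · rw [hdrop2]; exact hp2
  · rw [hdrop2]; exact hp3
  · rw [hdrop2]
    intro m hm0 hmk hmi
    rcases eq_or_lt_of_le (Int.lt_add_one_iff.mp hmi) with rfl | hmlt
    · exact ⟨m, by simp, le_refl m, le_refl _⟩
    · obtain ⟨e, heD, hme, hve⟩ := hcomp' m hm0 hmk hmlt
      have he0 := hbnd' e heD
      rcases hp4 e heD with hX | hge
      · exact ⟨e, List.mem_append_left _ hX, hme,
          by rw [hstab e he0.1 he0.2, hstab m hm0 hmlt]; exact hve⟩
      · refine ⟨i, by simp, by omega, ?_⟩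
        calc pvVal G i ≤ pvVal G e := hge
          _ = pvVal (pvFA T k i) e := hstab e he0.1 he0.2
          _ ≤ pvVal (pvFA T k i) m := hve
          _ = pvVal G m := (hstab m hm0 hmlt).symm

lemma pvBStep_pos (k : Int) (F dq : List Int) (head i : Int) (h : k ≤ i) :
    pvBStep k (F, dq, head) i =
      (PySem.List.pySetD F i (PySem.List.pyGetD F i 0 +
         PySem.List.pyGetD F (PySem.List.pyGetD dq (pvAdvance dq head (i - k)) 0) 0),
       pvPopBack
         (PySem.List.pyGetD (PySem.List.pySetD F i (PySem.List.pyGetD F i 0 +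
            PySem.List.pyGetD F (PySem.List.pyGetD dq (pvAdvance dq head (i - k)) 0) 0)) i 0)
         (PySem.List.pySetD F i (PySem.List.pyGetD F i 0 +
            PySem.List.pyGetD F (PySem.List.pyGetD dq (pvAdvance dq head (i - k)) 0) 0))
         dq (pvAdvance dq head (i - k)) ++ [i],
       pvAdvance dq head (i - k)) := by
  simp only [pvBStep, if_pos h]

lemma pvBStep_neg (k : Int) (F dq : List Int) (head i : Int) (h : ¬ k ≤ i) :
    pvBStep k (F, dq, head) i =
      (F, pvPopBack (PySem.List.pyGetD F i 0) F dq head ++ [i], head) := by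
  simp only [pvBStep, if_neg h]

-- the invariant holds after every loop iteration
lemma pvInv_step (T : List Int) (k i : Int) (hk : 1 ≤ k) (hi : 0 ≤ i)
    (h : pvInv T k i) : pvInv T k (i + 1) := by
  obtain ⟨dq, head, hBS, h0, hle, hsort, hbnd, hvals, hcomp⟩ := h
  set F := pvFA T k i with hF
  have hstep : pvBS T k (i + 1) = pvBStep k (F, dq, head) i := by
    rw [pvBS_succ T k i hi, hBS]
  by_cases hki : k ≤ i
  · -- i ≥ k: read the window minimum off the deque head
    obtain ⟨h0', hle', hdrop'⟩ := pvAdvance_spec dq (i - k) head h0 hle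
    set head' := pvAdvance dq head (i - k) with hhead'
    set d' : List Int := (dq.drop head.toNat).dropWhile (fun e => decide (e < i - k)) with hd'
    have hd'sub : d'.Sublist (dq.drop head.toNat) := List.dropWhile_sublist _
    have hne : d' ≠ [] := by
      obtain ⟨e, heD, hmle, _⟩ := hcomp (i - 1) (by omega) (by omega) (by omega)
      have : e ∈ d' := pv_mem_dropWhile_of_sorted _ _ _ hsort heD (by omega)
      exact List.ne_nil_of_mem this
    obtain ⟨estar, drest, hcons⟩ := List.exists_cons_of_ne_nil hne
    have hgetstar : PySem.List.pyGetD dq head' 0 = estar := by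
      rw [PySem.List.pyGetD_of_nonneg _ _ h0']
      have h01 : (dq.drop head'.toNat)[0]? = some estar := by
        rw [hdrop', hcons]; rfl
      rw [List.getElem?_drop] at h01
      simp only [List.getD_eq_getElem?_getD]
      rw [show head'.toNat + 0 = head'.toNat by omega] at h01
      rw [h01]
      rfl
    have hestar_mem : estar ∈ dq.drop head.toNat := hd'sub.mem (hcons ▸ List.mem_cons_self)
    have hestar_bnd := hbnd estar hestar_mem
    have hestar_ge : i - k ≤ estar := by
      have := pv_head_dropWhile _ _ _ _ (hd'.symm.trans hcons)
      simp only [decide_eq_false_iff_not, not_lt] at this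
      exact this
    -- the minimum of the window values, as computed by A's inner loop
    set v0 : Int := PySem.List.pyGetD F (i - k) 0 with hv0
    set l : List Int := PySem.List.pyRange (i - k + 1) i with hl
    set mw : Int := (l.map (fun j => PySem.List.pyGetD F j 0)).foldl min v0 with hmw
    have hres : (PySem.List.pyRange (i - k) i).foldl
        (fun r j => pvMinInf r (PySem.List.pyGetD F j 0)) none = some mw := by
      rw [PySem.List.pyRange_one_cons (by omega), List.foldl_cons]
      have h1 : pvMinInf none (PySem.List.pyGetD F (i - k) 0) = some v0 := rfl
      rw [h1, ← List.foldl_map (f := fun j => PySem.List.pyGetD F j 0)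
        (g := fun r v => pvMinInf r v), pvMinInf_foldl]
    have hmw_le : ∀ j : Int, i - k ≤ j → j < i → mw ≤ PySem.List.pyGetD F j 0 := by
      intro j hj1 hj2
      obtain ⟨ha, hb⟩ := PySem.List.foldl_min_le (l.map (fun j => PySem.List.pyGetD F j 0)) v0
      rcases eq_or_lt_of_le hj1 with rfl | hlt
      · exact ha
      · exact hb _ (List.mem_map_of_mem (PySem.List.mem_pyRange_one.mpr ⟨by omega, hj2⟩))
    have hmw_mem : ∃ j : Int, i - k ≤ j ∧ j < i ∧ PySem.List.pyGetD F j 0 = mw := by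
      rcases PySem.List.foldl_min_mem (l.map (fun j => PySem.List.pyGetD F j 0)) v0 with h1 | h1
      · exact ⟨i - k, le_refl _, by omega, h1.symm⟩
      · obtain ⟨j, hj, hfj⟩ := List.mem_map.mp h1
        have := PySem.List.mem_pyRange_one.mp hj
        exact ⟨j, by omega, by omega, hfj⟩
    have hvals' : (d'.map (pvVal F)).Pairwise (· ≤ ·) := hvals.sublist (hd'sub.map _)
    have hestar_val : PySem.List.pyGetD F estar 0 = mw := by
      refine le_antisymm ?_ (hmw_le estar hestar_ge hestar_bnd.2)
      obtain ⟨j, hj1, hj2, hj3⟩ := hmw_mem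
      obtain ⟨e, heD, hje, hve⟩ := hcomp j (by omega) hj1 hj2
      have heD' : e ∈ d' := pv_mem_dropWhile_of_sorted _ _ _ hsort heD (by omega)
      have hse : pvVal F estar ≤ pvVal F e := by
        rw [hcons] at heD' hvals'
        rcases List.mem_cons.mp heD' with rfl | hz
        · exact le_refl _
        · exact (List.pairwise_cons.mp hvals').1 _ (List.mem_map_of_mem hz)
      calc PySem.List.pyGetD F estar 0 = pvVal F estar := rfl
        _ ≤ pvVal F e := hse
        _ ≤ pvVal F j := hve
        _ = mw := hj3
    -- A's array after this iteration
    have hG : pvFA T k (i + 1) =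
        PySem.List.pySetD F i (PySem.List.pyGetD F i 0 + mw) := by
      rw [pvFA_succ T k i hki]
      simp only [ksumaStep]
      rw [hres]
      rfl
    have hstab : ∀ e : Int, 0 ≤ e → e < i → pvVal (pvFA T k (i + 1)) e = pvVal F e := by
      intro e he0 hei
      rw [hG]
      exact pvVal_set F i _ e (by omega) he0 (by omega)
    apply pvInv_assemble T k i hk hi (dq.take head'.toNat) d' head' h0'
    · rw [List.length_take]; omega
    · rw [hstep, pvBStep_pos k F dq head i hki, ← hhead', hgetstar, hestar_val, ← hG,
        pvPopBack_spec _ _ dq head' h0' hle', hdrop', List.append_assoc]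
    · exact hsort.sublist hd'sub
    · exact fun e he => hbnd e (hd'sub.mem he)
    · have hmapeq : d'.map (pvVal (pvFA T k (i + 1))) = d'.map (pvVal F) :=
        List.map_congr_left (fun e he => hstab e (hbnd e (hd'sub.mem he)).1
          (hbnd e (hd'sub.mem he)).2)
      rw [hmapeq]; exact hvals'
    · exact hstab
    · intro m hm0 hmk hmi
      obtain ⟨e, heD, hme, hve⟩ := hcomp m hm0 (by omega) hmi
      exact ⟨e, pv_mem_dropWhile_of_sorted _ _ _ hsort heD (by omega), hme, hve⟩
  · -- i < k: no window read, F is unchanged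
    have hG : pvFA T k (i + 1) = F := pvFA_succ_lt T k i (by omega)
    apply pvInv_assemble T k i hk hi (dq.take head.toNat) (dq.drop head.toNat) head h0
    · rw [List.length_take]; omega
    · rw [hstep, pvBStep_neg k F dq head i hki,
        pvPopBack_spec _ _ dq head h0 hle, hG, List.append_assoc]
    · exact hsort
    · exact hbnd
    · rw [hG]; exact hvals
    · intro e _ _; rw [hG]
    · intro m hm0 hmk hmi
      exact hcomp m hm0 (by omega) hmi

lemma pvInv_holds (T : List Int) (k : Int) (hk : 1 ≤ k) (i : Int) (hi : 0 ≤ i) :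
    pvInv T k i := by
  obtain ⟨n, rfl⟩ := Int.eq_ofNat_of_zero_le hi
  induction n with
  | zero =>
    simp only [Nat.cast_zero]
    refine ⟨[], 0, ?_, le_refl _, by simp, by simp, by simp, by simp, ?_⟩
    · unfold pvBS pvFA
      rw [PySem.List.pyRange_one_eq_nil (le_refl (0 : Int)),
        PySem.List.pyRange_one_eq_nil (by omega : (0 : Int) ≤ k)]
      rfl
    · intro m _ _ h3
      exact absurd h3 (by omega)
  | succ m ihm =>
    have h2 := pvInv_step T k (m : Int) hk (Int.natCast_nonneg m) (ihm (Int.natCast_nonneg m))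
    have hc : ((m + 1 : Nat) : Int) = (m : Int) + 1 := by push_cast; ring
    rw [hc]
    exact h2

lemma ksumaStep_length (k : Int) (F : List Int) (i : Int) :
    (ksumaStep k F i).length = F.length := by
  simp only [ksumaStep]
  exact PySem.List.length_pySetD _ _ _

lemma pvFA_length (T : List Int) (k i : Int) : (pvFA T k i).length = T.length := by
  unfold pvFA
  generalize PySem.List.pyRange k i = l
  induction l generalizing T with
  | nil => rfl
  | cons x xs ih => rw [List.foldl_cons, ih, ksumaStep_length]

-- xs[a : len(xs)] is xs[a :]
lemma pvSlice_to_len {α : Type} (xs : List α) (a : Int) :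
    PySem.List.slice xs (some a) (some (xs.length : Int)) = PySem.List.slice xs (some a) none := by
  simp [PySem.List.slice]

-- ===== VERDICT (by name: the statement is the Claim_ definition above) =====
theorem ksuma_spec : Claim_equal_ksuma := by
  unfold Claim_equal_ksuma
  intro T k _ hPre
  obtain ⟨hk, hT⟩ := hPre
  unfold Spec_ksuma ksuma ksuma_alt
  simp only [PySem.List.map_pyGetD_pyRange_zero']
  obtain ⟨dq, head, hBS, -, -, -, -, -, -⟩ :=
    pvInv_holds T k hk (T.length : Int) (Int.natCast_nonneg _)
  have hA : (PySem.List.pyRange k (T.length : Int)).foldl (ksumaStep k) T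
      = pvFA T k (T.length : Int) := rfl
  have hB : (PySem.List.pyRange 0 (T.length : Int)).foldl (pvBStep k) (T, ([], 0))
      = pvBS T k (T.length : Int) := rfl
  rw [hA, hB, hBS]
  have hs : PySem.List.slice (pvFA T k (T.length : Int)) (some ((T.length : Int) - k))
        (some (T.length : Int))
      = PySem.List.slice (pvFA T k (T.length : Int)) (some ((T.length : Int) - k)) none := by
    have h := pvSlice_to_len (pvFA T k (T.length : Int)) ((T.length : Int) - k)
    rwa [pvFA_length] at h
  rw [hs]
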